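-- pv_equiv track=rewrite | github.com/hamza-roujdami/talent-reconnect-agent | tools/scoring.py | _are_titles_related
-- ===== SOURCE A (Python) =====
-- def _are_titles_related(title1: str, title2: str) -> bool:
--     """Check if two job titles are in related fields."""
--     related_groups = [
--         {"engineer", "developer", "programmer", "coder"},
--         {"data scientist", "data analyst", "ml engineer", "machine learning"},
--         {"devops", "sre", "site reliability", "platform engineer", "infrastructure"},
--         {"frontend", "front-end", "ui", "ux", "web developer"},
--         {"backend", "back-end", "api", "server"},
--         {"fullstack", "full-stack", "full stack"},
--         {"manager", "lead", "director", "head"},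
--         {"product", "pm", "product owner"},
--     ]
--
--     for group in related_groups:
--         in_group_1 = any(term in title1 for term in group)
--         in_group_2 = any(term in title2 for term in group)
--         if in_group_1 and in_group_2:
--             return True
--     return False
-- ===== SOURCE B (Python) =====
-- def _are_titles_related(title1: str, title2: str) -> bool:
--     """Check if two job titles are in related fields."""
--     related_groups = [
--         ["engineer", "developer", "programmer", "coder"],
--         ["data scientist", "data analyst", "ml engineer", "machine learning"],
--         ["devops", "sre", "site reliability", "platform engineer", "infrastructure"],
--         ["frontend", "front-end", "ui", "ux", "web developer"],
--         ["backend", "back-end", "api", "server"],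
--         ["fullstack", "full-stack", "full stack"],
--         ["manager", "lead", "director", "head"],
--         ["product", "pm", "product owner"],
--     ]
--
--     # Flatten the table once into a term -> group-bit index, then score each
--     # title as a single bitmask of matched groups; related = masks share a bit.
--     term_bit = {}
--     bit = 1
--     for group in related_groups:
--         for term in group:
--             term_bit[term] = bit
--         bit <<= 1
--
--     def _mask(title):
--         m = 0
--         for term, b in term_bit.items():
--             if term in title:
--                 m |= b
--         return m
--
--     return (_mask(title1) & _mask(title2)) != 0
-- ===== Notes on version B (the rewrite author's own statement) =====
-- stated objective: alternative
-- what changed: Instead of A's per-group loop that tests both titles against each group and early-returns, B flattens the table once into a term->group-bit dictionary, scores each title independently as an integer bitmask of matched groups, and answers with a single bitwise AND of the two masks.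
import Mathlib
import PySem

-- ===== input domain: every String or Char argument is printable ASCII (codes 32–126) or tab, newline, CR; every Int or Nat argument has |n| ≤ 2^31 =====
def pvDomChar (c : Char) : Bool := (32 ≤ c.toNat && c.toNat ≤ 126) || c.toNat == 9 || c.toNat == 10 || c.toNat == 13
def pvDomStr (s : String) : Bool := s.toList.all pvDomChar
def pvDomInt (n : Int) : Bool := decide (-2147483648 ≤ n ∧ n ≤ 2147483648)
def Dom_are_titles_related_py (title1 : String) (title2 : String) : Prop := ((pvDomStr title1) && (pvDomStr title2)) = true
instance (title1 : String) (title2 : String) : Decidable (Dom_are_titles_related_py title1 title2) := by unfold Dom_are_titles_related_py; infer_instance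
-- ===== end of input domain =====

-- B flattens the group table once into a term -> group-bit dictionary and compares per-title
-- bitmasks with a single bitwise AND, instead of A's per-group both-titles loop with early return
-- (objective: alternative decomposition; same result).

-- ===== PORT A =====
-- the table of related title groups (Python set literals; elements distinct, iteration order irrelevant to `any`)
def pvRelatedGroups : List (List String) :=
  [ ["engineer", "developer", "programmer", "coder"],
    ["data scientist", "data analyst", "ml engineer", "machine learning"],
    ["devops", "sre", "site reliability", "platform engineer", "infrastructure"],
    ["frontend", "front-end", "ui", "ux", "web developer"],
    ["backend", "back-end", "api", "server"],
    ["fullstack", "full-stack", "full stack"],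
    ["manager", "lead", "director", "head"],
    ["product", "pm", "product owner"] ]

-- A's loop: for each group check both titles, early-return True
def pvLoopA (title1 title2 : String) : List (List String) → Bool
  | [] => false
  | g :: rest =>
    let in_group_1 := g.any (fun term => PySem.Str.isIn term title1)
    let in_group_2 := g.any (fun term => PySem.Str.isIn term title2)
    if in_group_1 && in_group_2 then true else pvLoopA title1 title2 rest

def are_titles_related_py (title1 : String) (title2 : String) : Bool :=
  pvLoopA title1 title2 pvRelatedGroups

-- ===== PORT B =====
-- B's own copy of the table (Source B redeclares it, as lists)
def pvRelatedGroupsB : List (List String) :=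
  [ ["engineer", "developer", "programmer", "coder"],
    ["data scientist", "data analyst", "ml engineer", "machine learning"],
    ["devops", "sre", "site reliability", "platform engineer", "infrastructure"],
    ["frontend", "front-end", "ui", "ux", "web developer"],
    ["backend", "back-end", "api", "server"],
    ["fullstack", "full-stack", "full stack"],
    ["manager", "lead", "director", "head"],
    ["product", "pm", "product owner"] ]

-- term_bit = {}; bit = 1; for group: for term: term_bit[term] = bit; bit <<= 1
-- (the masks are small nonnegative Python ints, ported as Nat — exact here)
def pvTermBit : PySem.Dict String Nat :=
  (pvRelatedGroupsB.foldl
    (fun (st : PySem.Dict String Nat × Nat) g =>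
      (g.foldl (fun d term => d.insert term st.2) st.1, st.2 <<< 1))
    (PySem.Dict.empty, 1)).1

-- def _mask(title): m = 0; for term, b in term_bit.items(): if term in title: m |= b; return m
def pvMask (title : String) : Nat :=
  pvTermBit.items.foldl
    (fun m p => if PySem.Str.isIn p.1 title then m ||| p.2 else m) 0

def are_titles_related_py_alt (title1 : String) (title2 : String) : Bool :=
  decide (pvMask title1 &&& pvMask title2 ≠ 0)

-- ===== PRECONDITION & SPEC =====
def Spec_are_titles_related_py (title1 : String) (title2 : String) (out : Bool) : Prop := out = are_titles_related_py_alt title1 title2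
instance (title1 : String) (title2 : String) (out : Bool) : Decidable (Spec_are_titles_related_py title1 title2 out) := by unfold Spec_are_titles_related_py; infer_instance

-- ===== CLAIM (what is proved, stated in full; the proofs are below) =====
def Claim_equal_are_titles_related_py : Prop := ∀ (title1 : String) (title2 : String), Dom_are_titles_related_py title1 title2 → Spec_are_titles_related_py title1 title2 (are_titles_related_py title1 title2)

-- ===== LEMMAS AND PROOFS =====

-- the term->bit dictionary, written out (bits as powers of two)
def pvE : List (String × Nat) :=
  [ ("engineer", 2^0), ("developer", 2^0), ("programmer", 2^0), ("coder", 2^0),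
    ("data scientist", 2^1), ("data analyst", 2^1), ("ml engineer", 2^1), ("machine learning", 2^1),
    ("devops", 2^2), ("sre", 2^2), ("site reliability", 2^2), ("platform engineer", 2^2), ("infrastructure", 2^2),
    ("frontend", 2^3), ("front-end", 2^3), ("ui", 2^3), ("ux", 2^3), ("web developer", 2^3),
    ("backend", 2^4), ("back-end", 2^4), ("api", 2^4), ("server", 2^4),
    ("fullstack", 2^5), ("full-stack", 2^5), ("full stack", 2^5),
    ("manager", 2^6), ("lead", 2^6), ("director", 2^6), ("head", 2^6),
    ("product", 2^7), ("pm", 2^7), ("product owner", 2^7) ]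

theorem pvTermBit_items : pvTermBit.items = pvE := by decide

-- a bit of the mask-accumulating fold
theorem foldl_mask_testBit (title : String) (L : List (String × Nat)) (acc j : Nat) :
    (L.foldl (fun m p => if PySem.Str.isIn p.1 title then m ||| p.2 else m) acc).testBit j
      = (acc.testBit j || L.any (fun p => PySem.Str.isIn p.1 title && p.2.testBit j)) := by
  induction L generalizing acc with
  | nil => simp
  | cons p L ih =>
    simp only [List.foldl_cons, List.any_cons]
    rw [ih]
    by_cases h : PySem.Str.isIn p.1 title = true
    · rw [if_pos h, h, Nat.testBit_or]
      simp [Bool.or_assoc]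
    · have hf : PySem.Str.isIn p.1 title = false := Bool.eq_false_iff.mpr h
      rw [if_neg h, hf]
      simp

theorem pvMask_testBit (title : String) (j : Nat) :
    (pvMask title).testBit j = pvE.any (fun p => PySem.Str.isIn p.1 title && p.2.testBit j) := by
  unfold pvMask
  rw [pvTermBit_items, foldl_mask_testBit]
  simp

theorem pvMask_lt (title : String) : pvMask title < 256 := by
  unfold pvMask
  rw [pvTermBit_items]
  have : ∀ (L : List (String × Nat)) (acc : Nat), acc < 256 → (∀ p ∈ L, p.2 < 256) →
      (L.foldl (fun m p => if PySem.Str.isIn p.1 title then m ||| p.2 else m) acc) < 256 := by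
    intro L
    induction L with
    | nil => intro acc h _; simpa using h
    | cons p L ih =>
      intro acc hacc hL
      simp only [List.foldl_cons]
      refine ih _ ?_ (fun q hq => hL q (List.mem_cons_of_mem _ hq))
      by_cases h : PySem.Str.isIn p.1 title = true
      · rw [if_pos h]
        exact Nat.or_lt_two_pow (n := 8) hacc (hL p (List.mem_cons_self ..))
      · rw [if_neg h]
        exact hacc
  exact this pvE 0 (by norm_num) (by decide)

theorem pvMask_testBit_high (title : String) (j : Nat) (hj : 8 ≤ j) :
    (pvMask title).testBit j = false := by
  apply Nat.testBit_lt_two_pow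
  calc pvMask title < 2 ^ 8 := pvMask_lt title
    _ ≤ 2 ^ j := Nat.pow_le_pow_right (by norm_num) hj

-- bit j of the mask (j < 8) says: group j has a term occurring in the title
theorem pvMask_char (title : String) (j : Nat) (hj : j < 8) :
    (pvMask title).testBit j
      = (pvRelatedGroups.getD j []).any (fun term => PySem.Str.isIn term title) := by
  rw [pvMask_testBit]
  interval_cases j <;>
    · simp only [pvE, List.any_cons, List.any_nil, Nat.testBit_two_pow]
      simp [pvRelatedGroups, List.getD]

-- A's loop is `any` of the both-titles check over the groups
theorem pvLoopA_eq_any (title1 title2 : String) (gs : List (List String)) :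
    pvLoopA title1 title2 gs
      = gs.any (fun g => g.any (fun term => PySem.Str.isIn term title1)
                          && g.any (fun term => PySem.Str.isIn term title2)) := by
  induction gs with
  | nil => rfl
  | cons g rest ih =>
    simp only [pvLoopA, List.any_cons, ← ih]
    by_cases h : (g.any (fun term => PySem.Str.isIn term title1)
        && g.any (fun term => PySem.Str.isIn term title2)) = true
    · rw [if_pos h, h, Bool.true_or]
    · rw [if_neg h]
      rw [Bool.eq_iff_iff]
      simp only [Bool.or_eq_true]
      constructor
      · exact Or.inr
      · rintro (hc | hc)
        · exact absurd hc h
        · exact hc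

theorem exists_testBit_of_ne_zero {x : Nat} (h : x ≠ 0) : ∃ i, x.testBit i = true := by
  by_contra hc
  refine h (Nat.eq_of_testBit_eq fun i => ?_)
  rw [Nat.zero_testBit]
  cases hx : x.testBit i
  · rfl
  · exact absurd ⟨i, hx⟩ hc

-- ===== VERDICT (by name: the statement is the Claim_ definition above) =====
theorem are_titles_related_py_spec : Claim_equal_are_titles_related_py := by
  intro title1 title2 _
  unfold Spec_are_titles_related_py
  unfold are_titles_related_py are_titles_related_py_alt
  rw [pvLoopA_eq_any, Bool.eq_iff_iff, List.any_eq_true, decide_eq_true_iff]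
  constructor
  · rintro ⟨g, hg, hgb⟩
    rcases List.mem_iff_getElem.1 hg with ⟨k, hk, rfl⟩
    obtain ⟨h1, h2⟩ := (Bool.and_eq_true _ _).mp hgb
    have hk8 : k < 8 := by simpa [pvRelatedGroups] using hk
    have hgetD : pvRelatedGroups.getD k [] = pvRelatedGroups[k] := List.getD_eq_getElem _ _ hk
    have h1' : (pvRelatedGroups.getD k []).any (fun term => PySem.Str.isIn term title1) = true := by
      rw [hgetD]; exact h1
    have h2' : (pvRelatedGroups.getD k []).any (fun term => PySem.Str.isIn term title2) = true := by
      rw [hgetD]; exact h2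
    intro h0
    have hbit : ((pvMask title1 &&& pvMask title2).testBit k) = false := by
      rw [h0]; exact Nat.zero_testBit k
    rw [Nat.testBit_and, pvMask_char title1 k hk8, pvMask_char title2 k hk8, h1', h2'] at hbit
    simp at hbit
  · intro h0
    rcases exists_testBit_of_ne_zero h0 with ⟨j, hj⟩
    rw [Nat.testBit_and, Bool.and_eq_true] at hj
    obtain ⟨hj1, hj2⟩ := hj
    have hj8 : j < 8 := by
      by_contra hge
      rw [pvMask_testBit_high title1 j (by omega)] at hj1
      exact Bool.false_ne_true hj1
    have hgetD : pvRelatedGroups.getD j [] = pvRelatedGroups[j]'(by simpa [pvRelatedGroups] using hj8) :=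
      List.getD_eq_getElem _ _ (by simpa [pvRelatedGroups] using hj8)
    rw [pvMask_char title1 j hj8, hgetD] at hj1
    rw [pvMask_char title2 j hj8, hgetD] at hj2
    exact ⟨_, List.getElem_mem _, (Bool.and_eq_true _ _).mpr ⟨hj1, hj2⟩⟩
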